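-- pv_equiv track=rewrite | github.com/Primitive-Coding/TechnicalAnalysis | technical_analysis.py | _create_markers
-- ===== SOURCE A (Python) =====
-- def _create_markers(
--     series_indexes: list, marker_indexes: list, marker_label: str
-- ):
--     index = 0
--     markers = []
--     for i in series_indexes:
--         if index in marker_indexes:
--             markers.append(marker_label)
--         else:
--             # markers.append(None)
--             markers.append("")
--         index += 1
--     return markers
-- ===== SOURCE B (Python) =====
-- def _create_markers(
--     series_indexes: list, marker_indexes: list, marker_label: str
-- ):
--     n = len(series_indexes)
--     markers = [""] * n
--     for idx in marker_indexes:
--         if 0 <= idx < n: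
--             markers[idx] = marker_label
--     return markers
-- ===== Notes on version B (the rewrite author's own statement) =====
-- stated objective: faster
-- what changed: B preallocates an empty-label list of len(series_indexes) and scatters marker_label into the in-range marker indexes, replacing A's per-position membership scan of marker_indexes.
import Mathlib
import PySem

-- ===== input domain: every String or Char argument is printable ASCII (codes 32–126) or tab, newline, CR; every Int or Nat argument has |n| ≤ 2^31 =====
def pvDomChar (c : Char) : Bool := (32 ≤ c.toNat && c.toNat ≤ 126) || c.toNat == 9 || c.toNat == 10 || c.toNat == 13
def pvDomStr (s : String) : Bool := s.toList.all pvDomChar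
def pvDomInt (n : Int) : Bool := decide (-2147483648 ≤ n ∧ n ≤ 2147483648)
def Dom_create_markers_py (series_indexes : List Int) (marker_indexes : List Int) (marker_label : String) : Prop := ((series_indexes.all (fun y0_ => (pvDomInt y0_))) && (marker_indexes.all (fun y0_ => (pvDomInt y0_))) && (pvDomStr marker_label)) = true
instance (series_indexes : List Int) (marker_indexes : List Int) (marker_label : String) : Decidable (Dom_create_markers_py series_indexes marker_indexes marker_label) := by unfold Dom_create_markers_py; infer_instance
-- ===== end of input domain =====

-- B scatters marker_label into a preallocated list of empty labels instead of
-- testing each position for membership in marker_indexes.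

-- ===== PORT A =====
-- the for-loop carrying `index`, appending marker_label when `index in marker_indexes`
def create_markers_py_go (marker_indexes : List Int) (marker_label : String) :
    List Int → Int → List String
  | [], _ => []
  | _ :: rest, index =>
      (if marker_indexes.contains index then marker_label else "")
        :: create_markers_py_go marker_indexes marker_label rest (index + 1)

def create_markers_py (series_indexes : List Int) (marker_indexes : List Int) (marker_label : String) : List String :=
  create_markers_py_go marker_indexes marker_label series_indexes 0

-- ===== PORT B =====
-- markers = [""] * n; for idx in marker_indexes: if 0 <= idx < n: markers[idx] = marker_label
def create_markers_py_alt (series_indexes : List Int) (marker_indexes : List Int) (marker_label : String) : List String :=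
  marker_indexes.foldl
    (fun markers idx =>
      if 0 ≤ idx ∧ idx < (series_indexes.length : Int) then
        markers.set idx.toNat marker_label
      else markers)
    (List.replicate series_indexes.length "")

-- ===== PRECONDITION & SPEC =====
def Spec_create_markers_py (series_indexes : List Int) (marker_indexes : List Int) (marker_label : String) (out : List String) : Prop := out = create_markers_py_alt series_indexes marker_indexes marker_label
instance (series_indexes : List Int) (marker_indexes : List Int) (marker_label : String) (out : List String) : Decidable (Spec_create_markers_py series_indexes marker_indexes marker_label out) := by unfold Spec_create_markers_py; infer_instance

-- ===== CLAIM (what is proved, stated in full; the proofs are below) =====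
def Claim_equal_create_markers_py : Prop := ∀ (series_indexes : List Int) (marker_indexes : List Int) (marker_label : String), Dom_create_markers_py series_indexes marker_indexes marker_label → Spec_create_markers_py series_indexes marker_indexes marker_label (create_markers_py series_indexes marker_indexes marker_label)

-- ===== LEMMAS AND PROOFS =====

-- A's loop produces, for the k-th remaining element, the label decided by (index + k)
theorem goA_eq_map (mi : List Int) (lbl : String) (si : List Int) (index : Int) :
    create_markers_py_go mi lbl si index =
      (List.range si.length).map
        (fun (k : Nat) => if mi.contains (index + (k : Int)) then lbl else "") := by
  induction si generalizing index with
  | nil => simp [create_markers_py_go]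
  | cons x rest ih =>
      have h : ∀ k : Nat, index + 1 + (k : Int) = index + ((k : Int) + 1) := by
        intro k; ring
      simp only [create_markers_py_go, List.length_cons, List.range_succ_eq_map,
        List.map_cons, List.map_map, ih (index + 1)]
      refine congrArg₂ List.cons ?_ ?_
      · norm_num
      · apply List.map_congr_left
        intro k _
        simp [Function.comp, Nat.succ_eq_add_one, h]

theorem foldl_step_length (mi : List Int) (lbl : String) (n : Nat) (acc : List String) :
    (mi.foldl
      (fun markers idx =>
        if 0 ≤ idx ∧ idx < (n : Int) then markers.set idx.toNat lbl else markers)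
      acc).length = acc.length := by
  induction mi generalizing acc with
  | nil => rfl
  | cons x rest ih =>
      simp only [List.foldl_cons, ih]
      split <;> simp

theorem foldl_step_getElem? (mi : List Int) (lbl : String) (n : Nat) (acc : List String)
    (hlen : acc.length = n) (j : Nat) (hj : j < acc.length) :
    (mi.foldl
      (fun markers idx =>
        if 0 ≤ idx ∧ idx < (n : Int) then markers.set idx.toNat lbl else markers)
      acc)[j]? = if (j : Int) ∈ mi then some lbl else acc[j]? := by
  induction mi generalizing acc with
  | nil => simp
  | cons x rest ih =>
      simp only [List.foldl_cons]
      by_cases hguard : 0 ≤ x ∧ x < (n : Int)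
      · have hset : (acc.set x.toNat lbl).length = n := by simpa using hlen
        have hjset : j < (acc.set x.toNat lbl).length := by omega
        rw [if_pos hguard, ih (acc.set x.toNat lbl) hset hjset]
        by_cases hr : (j : Int) ∈ rest
        · simp [hr]
        · by_cases hx : x = (j : Int)
          · have hnat : x.toNat = j := by omega
            have hc : ((j : Int) = x ∨ (j : Int) ∈ rest) := Or.inl hx.symm
            rw [if_neg hr, if_pos (by simpa using hc), List.getElem?_set,
              if_pos hnat, if_pos (by omega : x.toNat < acc.length)]
          · have hne : x.toNat ≠ j := by omega
            have hc : ¬((j : Int) = x ∨ (j : Int) ∈ rest) := by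
              push Not; exact ⟨fun hh => hx hh.symm, hr⟩
            rw [if_neg hr, if_neg (by simpa using hc), List.getElem?_set, if_neg hne]
      · rw [if_neg hguard, ih acc hlen hj]
        have hx : (j : Int) ≠ x := by omega
        by_cases hr : (j : Int) ∈ rest
        · simp [hr]
        · have hc : ¬((j : Int) = x ∨ (j : Int) ∈ rest) := by
            push Not; exact ⟨hx, hr⟩
          rw [if_neg hr, if_neg (by simpa using hc)]

-- ===== VERDICT (by name: the statement is the Claim_ definition above) =====
theorem create_markers_py_spec : Claim_equal_create_markers_py := by
  intro si mi lbl _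
  unfold Spec_create_markers_py create_markers_py create_markers_py_alt
  rw [goA_eq_map]
  apply List.ext_getElem?
  intro j
  by_cases hj : j < si.length
  · rw [foldl_step_getElem? mi lbl si.length (List.replicate si.length "")
      (by simp) j (by simpa using hj)]
    by_cases hm : (j : Int) ∈ mi <;> simp [hj, hm]
  · have h2 : ¬ j < (mi.foldl
        (fun markers idx =>
          if 0 ≤ idx ∧ idx < ((si.length : Nat) : Int) then markers.set idx.toNat lbl
          else markers)
        (List.replicate si.length "")).length := by
      rw [foldl_step_length]; simpa using hj
    rw [List.getElem?_eq_none (by simpa using hj), List.getElem?_eq_none (by omega)]
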